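-- pv_equiv track=rewrite | github.com/qhdrl12/langsmith-scrape-eval | src/langsmith_scape_eval/scrape_langsmith_evaluators.py | classify_tools_by_type
-- ===== SOURCE A (Python) =====
-- from typing import Dict, Any, List, Optional
--
-- TOOL_TYPE_KEYWORDS = {
--     "scraping": ["scrape", "extract", "parse"],
--     "crawling": ["crawl", "fetch", "browse"],
--     "search": ["search", "query", "find"],
--     "api": ["api", "request", "call"],
-- }
--
-- def classify_tools_by_type(tool_calls: List[Dict[str, Any]]) -> Dict[str, int]:
--     """도구를 타입별로 분류하여 개수 반환"""
--     counts = {tool_type: 0 for tool_type in TOOL_TYPE_KEYWORDS.keys()}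
--     counts["other"] = 0
--
--     for tool_call in tool_calls:
--         tool_name = tool_call['tool_name'].lower()
--         classified = False
--
--         for tool_type, keywords in TOOL_TYPE_KEYWORDS.items():
--             if any(keyword in tool_name for keyword in keywords):
--                 counts[tool_type] += 1
--                 classified = True
--                 break
--
--         if not classified:
--             counts["other"] += 1
--
--     return counts
-- ===== SOURCE B (Python) =====
-- from typing import Dict, Any, List, Optional
--
-- TOOL_TYPE_KEYWORDS = {
--     "scraping": ["scrape", "extract", "parse"],
--     "crawling": ["crawl", "fetch", "browse"],
--     "search": ["search", "query", "find"],
--     "api": ["api", "request", "call"],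
-- }
--
-- def classify_tools_by_type(tool_calls: List[Dict[str, Any]]) -> Dict[str, int]:
--     """Sieve: for each type in table order, count and remove the names it
--     captures; what survives every stage is 'other'. First-match order is
--     preserved because a name is removed at its first matching stage."""
--     remaining = [tc['tool_name'].lower() for tc in tool_calls]
--     counts = {}
--     for tool_type, keywords in TOOL_TYPE_KEYWORDS.items():
--         counts[tool_type] = len([n for n in remaining
--                                  if any(k in n for k in keywords)])
--         remaining = [n for n in remaining
--                      if not any(k in n for k in keywords)]
--     counts["other"] = len(remaining)
--     return counts
-- ===== Notes on version B (the rewrite author's own statement) =====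
-- stated objective: alternative
-- what changed: A classifies each call in one pass with a mutable counts dict, a classified flag and an inner break-loop; B instead runs a staged sieve over the keyword table: for each type in order it counts the names a stage captures and filters them out of the shrinking list, so first-match semantics comes from removal order and 'other' is whatever survives all stages.
import Mathlib
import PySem

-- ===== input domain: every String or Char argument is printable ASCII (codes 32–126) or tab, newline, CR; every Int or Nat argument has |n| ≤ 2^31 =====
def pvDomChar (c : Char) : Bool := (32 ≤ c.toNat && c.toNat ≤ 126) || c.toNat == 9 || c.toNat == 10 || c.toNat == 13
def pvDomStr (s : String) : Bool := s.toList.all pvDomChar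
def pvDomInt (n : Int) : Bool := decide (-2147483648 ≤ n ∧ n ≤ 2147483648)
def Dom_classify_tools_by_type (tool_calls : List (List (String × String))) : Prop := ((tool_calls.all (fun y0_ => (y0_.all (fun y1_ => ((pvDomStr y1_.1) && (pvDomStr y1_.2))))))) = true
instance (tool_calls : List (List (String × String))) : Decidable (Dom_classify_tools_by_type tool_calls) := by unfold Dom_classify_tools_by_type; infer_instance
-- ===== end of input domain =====

-- B replaces A's per-call flag-and-increment loop by a staged sieve over the keyword
-- table: each stage counts and removes the names it captures; objective: alternative.

-- TOOL_TYPE_KEYWORDS, in insertion order (shared module-level constant of both programs)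
def pvKeywords : List (String × List String) :=
  [("scraping", ["scrape", "extract", "parse"]),
   ("crawling", ["crawl", "fetch", "browse"]),
   ("search",   ["search", "query", "find"]),
   ("api",      ["api", "request", "call"])]

-- ===== PORT A =====
-- counts = {tool_type: 0 for tool_type in TOOL_TYPE_KEYWORDS.keys()}; counts["other"] = 0
def pvInitCounts : PySem.Dict String Int :=
  ((pvKeywords.map (·.1)).foldl (fun d t => d.insert t 0) PySem.Dict.empty).insert "other" 0

-- A's inner 'for tool_type, keywords … break' with the classified flag: the
-- not-classified arm is the [] case (loop ran out without break).
def pvFindLoop (counts : PySem.Dict String Int) (tool_name : String) :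
    List (String × List String) → PySem.Dict String Int
  | [] => counts.modify "other" 0 (· + 1)
  | (tool_type, keywords) :: rest =>
    if keywords.any (fun k => PySem.Str.isIn k tool_name) then
      counts.modify tool_type 0 (· + 1)
    else
      pvFindLoop counts tool_name rest

def classify_tools_by_type (tool_calls : List (List (String × String))) : List (String × Int) :=
  (tool_calls.foldl
    (fun counts tool_call =>
      -- tool_call['tool_name'] (KeyError excluded by Pre_) .lower()
      let tool_name := PySem.Str.lower ((PySem.Dict.mk tool_call).getD "tool_name" "")
      pvFindLoop counts tool_name pvKeywords)
    pvInitCounts).items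

-- ===== PORT B =====
-- any(k in n for k in keywords)
def pvMatches (keywords : List String) (n : String) : Bool :=
  keywords.any (fun k => PySem.Str.isIn k n)

-- staged sieve: fold over the keyword table carrying (counts so far, remaining names);
-- counts is a dict whose keys are fresh at each stage, so it is an append-only assoc list
def classify_tools_by_type_alt (tool_calls : List (List (String × String))) : List (String × Int) :=
  let remaining := tool_calls.map
    (fun tc => PySem.Str.lower ((PySem.Dict.mk tc).getD "tool_name" ""))
  let st := pvKeywords.foldl
    (fun (st : List (String × Int) × List String) p =>
      (st.1 ++ [(p.1, ((st.2.filter (pvMatches p.2)).length : Int))],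
       st.2.filter (fun n => !pvMatches p.2 n)))
    ([], remaining)
  st.1 ++ [("other", (st.2.length : Int))]

-- ===== PRECONDITION & SPEC =====
-- Pre_ excludes exactly the inputs where A raises KeyError: a tool_call without a 'tool_name' key.
def Pre_classify_tools_by_type (tool_calls : List (List (String × String))) : Prop :=
  (tool_calls.all (fun tc => tc.any (fun p => p.1 == "tool_name"))) = true
instance (tool_calls : List (List (String × String))) : Decidable (Pre_classify_tools_by_type tool_calls) := by unfold Pre_classify_tools_by_type; infer_instance

def pvWitness_classify_tools_by_type : (List (List (String × String))) :=
  [[("tool_name", "Scrape_Page")], [("tool_name", "do_stuff")]]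

def Spec_classify_tools_by_type (tool_calls : List (List (String × String))) (out : List (String × Int)) : Prop := out = classify_tools_by_type_alt tool_calls
instance (tool_calls : List (List (String × String))) (out : List (String × Int)) : Decidable (Spec_classify_tools_by_type tool_calls out) := by unfold Spec_classify_tools_by_type; infer_instance

-- ===== CLAIM (what is proved, stated in full; the proofs are below) =====
def Claim_equal_classify_tools_by_type : Prop := ∀ (tool_calls : List (List (String × String))), Dom_classify_tools_by_type tool_calls → Pre_classify_tools_by_type tool_calls → Spec_classify_tools_by_type tool_calls (classify_tools_by_type tool_calls)

-- ===== LEMMAS AND PROOFS =====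

-- first keyword-table entry whose keywords match, else "other" (proof-side reference)
def pvCategory (tool_name : String) : String :=
  match pvKeywords.find? (fun p => pvMatches p.2 tool_name) with
  | some p => p.1
  | none => "other"

-- A's inner break-loop over the literal keyword table increments exactly the category key.
lemma pvFindLoop_eq (counts : PySem.Dict String Int) (name : String) :
    pvFindLoop counts name pvKeywords = counts.modify (pvCategory name) 0 (· + 1) := by
  simp only [pvKeywords, pvFindLoop, pvCategory, pvMatches, List.find?]
  split_ifs <;> simp_all only [Bool.not_eq_true]

lemma pvSet_update_of_subset {α : Type} [BEq α] [LawfulBEq α]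
    (l : List α) (s : PySem.Set α) (h : ∀ x ∈ l, x ∈ s) :
    PySem.Set.update s l = s := by
  induction l generalizing s with
  | nil => rfl
  | cons a l ih =>
    have ha : a ∈ s := h a (by simp)
    simp only [PySem.Set.update, List.foldl_cons]
    rw [show PySem.Set.add s a = s by simp [PySem.Set.add, PySem.Set.contains, ha]]
    exact ih s (fun x hx => h x (by simp [hx]))

lemma pvCategory_mem_keys (tool_name : String) :
    pvCategory tool_name ∈ pvInitCounts.keys := by
  cases hf : pvKeywords.find? (fun p => pvMatches p.2 tool_name) with
  | none => simp only [pvCategory, hf]; decide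
  | some p =>
    have hp := List.mem_of_find?_eq_some hf
    simp only [pvCategory, hf]
    fin_cases hp <;> decide

-- A equals the reference "per key, count of that category among the labels"
lemma pvA_eq_ref (tool_calls : List (List (String × String))) :
    classify_tools_by_type tool_calls =
      (pvKeywords.map (·.1) ++ ["other"]).map
        (fun t => (t, ((tool_calls.map
          (fun tc => pvCategory (PySem.Str.lower ((PySem.Dict.mk tc).getD "tool_name" "")))).count t : Int))) := by
  unfold classify_tools_by_type
  simp only [pvFindLoop_eq]
  rw [← List.foldl_map
        (f := fun tc : List (String × String) => pvCategory (PySem.Str.lower ((PySem.Dict.mk tc).getD "tool_name" "")))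
        (g := fun (c : PySem.Dict String Int) x => c.modify x 0 (· + 1))]
  set labels := tool_calls.map
    (fun tc => pvCategory (PySem.Str.lower ((PySem.Dict.mk tc).getD "tool_name" ""))) with hl
  have hkeys : (labels.foldl (fun d x => d.modify x 0 (· + 1)) pvInitCounts).keys
      = pvInitCounts.keys := by
    rw [PySem.Dict.keys_foldl_modify labels 0 (fun _ _ => (· + 1)) pvInitCounts]
    exact pvSet_update_of_subset labels pvInitCounts.keys
      (fun x hx => by
        obtain ⟨tc, _, rfl⟩ := List.mem_map.mp (hl ▸ hx)
        exact pvCategory_mem_keys _)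
  have hnodup : (labels.foldl (fun d x => d.modify x 0 (· + 1)) pvInitCounts).keys.Nodup := by
    rw [hkeys]; decide
  rw [PySem.Dict.items_eq_map_keys _ hnodup 0, hkeys]
  have hk : pvInitCounts.keys = pvKeywords.map (·.1) ++ ["other"] := by decide
  rw [hk]
  apply List.map_congr_left
  intro t ht
  rw [PySem.Dict.getD_foldl_modify_add_one labels pvInitCounts t]
  have h0 : pvInitCounts.getD t 0 = 0 := by
    fin_cases ht <;> decide
  rw [h0, zero_add]

-- per-name case analysis: each stage's survive-and-match test IS "category = this type"
lemma pvStage_pred (n : String) :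
    (pvMatches ["scrape", "extract", "parse"] n = (pvCategory n == "scraping"))
  ∧ ((!pvMatches ["scrape", "extract", "parse"] n && pvMatches ["crawl", "fetch", "browse"] n)
      = (pvCategory n == "crawling"))
  ∧ ((!pvMatches ["scrape", "extract", "parse"] n && (!pvMatches ["crawl", "fetch", "browse"] n
      && pvMatches ["search", "query", "find"] n)) = (pvCategory n == "search"))
  ∧ ((!pvMatches ["scrape", "extract", "parse"] n && (!pvMatches ["crawl", "fetch", "browse"] n
      && (!pvMatches ["search", "query", "find"] n && pvMatches ["api", "request", "call"] n)))
      = (pvCategory n == "api"))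
  ∧ ((!pvMatches ["scrape", "extract", "parse"] n && (!pvMatches ["crawl", "fetch", "browse"] n
      && (!pvMatches ["search", "query", "find"] n && !pvMatches ["api", "request", "call"] n)))
      = (pvCategory n == "other")) := by
  simp only [pvCategory, pvKeywords, List.find?]
  cases h1 : pvMatches ["scrape", "extract", "parse"] n <;>
  cases h2 : pvMatches ["crawl", "fetch", "browse"] n <;>
  cases h3 : pvMatches ["search", "query", "find"] n <;>
  cases h4 : pvMatches ["api", "request", "call"] n <;>
  simp

-- count of a label among names, as countP over the names
lemma pvCount_label (names : List String) (t : String) :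
    (names.map pvCategory).count t = names.countP (fun n => pvCategory n == t) := by
  rw [List.count_eq_countP, List.countP_map]
  rfl

-- B equals the same reference
lemma pvB_eq_ref (tool_calls : List (List (String × String))) :
    classify_tools_by_type_alt tool_calls =
      (pvKeywords.map (·.1) ++ ["other"]).map
        (fun t => (t, ((tool_calls.map
          (fun tc => pvCategory (PySem.Str.lower ((PySem.Dict.mk tc).getD "tool_name" "")))).count t : Int))) := by
  unfold classify_tools_by_type_alt
  set names := tool_calls.map
    (fun tc => PySem.Str.lower ((PySem.Dict.mk tc).getD "tool_name" "")) with hn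
  have hmapmap : tool_calls.map
      (fun tc => pvCategory (PySem.Str.lower ((PySem.Dict.mk tc).getD "tool_name" ""))) =
      names.map pvCategory := by
    rw [hn, List.map_map]; rfl
  rw [hmapmap]
  simp only [pvKeywords, List.foldl_cons, List.foldl_nil, List.map_cons, List.map_nil,
    List.nil_append, List.cons_append, List.filter_filter]
  simp only [← List.countP_eq_length_filter, pvCount_label, List.cons.injEq,
    Prod.mk.injEq, true_and, and_true]
  and_intros <;>
    exact congrArg _ (List.countP_congr (fun n _ => by
      have h := pvStage_pred n
      cases hA : pvMatches ["scrape", "extract", "parse"] n <;>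
      cases hB : pvMatches ["crawl", "fetch", "browse"] n <;>
      cases hC : pvMatches ["search", "query", "find"] n <;>
      cases hD : pvMatches ["api", "request", "call"] n <;>
      simp_all))

-- ===== VERDICT (by name: the statement is the Claim_ definition above) =====
theorem classify_tools_by_type_spec : Claim_equal_classify_tools_by_type := by
  intro tool_calls _ _
  show _ = _
  rw [pvA_eq_ref, pvB_eq_ref]
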